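-- pv_equiv track=rewrite | github.com/Raychani1/FEI_STU_Bachelor | Year 1./1. Term ( Winter )/Programming_1_(B-PROG1)/Project/Ludo_(Refactored_2020)/Game/playerFunctions.py | map_route_a
-- ===== SOURCE A (Python) =====
-- def map_route_a(n, board):
--     route_a = []
--     # Táto funkcia bude fungovať, ako "mapa" pre hráča A, do zoznamu trat_A budeme postupne pridávať ("appendovať") tie pozície, na ktorých sa nachádzajú hviezdičky
--     # , pretože na tie pole môže stúpiť hráč A, táto funkcia potom nám umožňí ľahší pohyb (nebudeme po jednom kráčat, ale rovno sa dostaneme ("skočíme") na pole)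
--     # Šachovnicu rozdelíme na 5 častí: na 4 štvrtiny a na Domčeky
--     for i in range(0, n // 2 + 1):  # 1.štvrtina
--         for j in range(n // 2 + 1, n):
--             if board[i][j] == "*":
--                 poz = [i, j]
--                 route_a.append(poz)
--
--     for i in range(n // 2 + 1, n):  # 2.štvrtina
--         for j in range(n - 1, n // 2 - 1, -1):
--             if board[i][j] == "*":
--                 poz = [i, j]
--                 route_a.append(poz)
--
--     for i in range(n - 1, n // 2, -1):  # 3.štvrtina
--         for j in range(n // 2 - 1, -1, -1):
--             if board[i][j] == "*":
--                 poz = [i, j]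
--                 route_a.append(poz)
--
--     for i in range(n // 2, -1, -1):  # 4.štvrtina
--         for j in range(0, n // 2 + 1):
--             if board[i][j] == "*":
--                 poz = [i, j]
--                 route_a.append(poz)
--
--     for i in range(0, n // 2):  # Domčeky
--         j = n // 2
--
--         if board[i][j] == "D":
--             poz = [i, j]
--             route_a.append(poz)
--
--     return route_a
-- ===== SOURCE B (Python) =====
-- def map_route_a(n, board):
--     # Single row-major pass over the board: each cell is read once and routed
--     # to one of five accumulators (four quadrant segments + home column), with
--     # the descending-order segments built by prepending; concatenate at the end.
--     h = n // 2
--     q1 = []; q2 = []; q3 = []; q4 = []; home = []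
--     for i in range(n):
--         row = board[i]
--         a1 = []; a2 = []; a3 = []; a4 = []
--         for j in range(n):
--             if row[j] == "*":
--                 if j > h:
--                     if i <= h:
--                         a1.append([i, j])
--                     else:
--                         a2.insert(0, [i, j])
--                 elif j < h:
--                     if i > h:
--                         a3.insert(0, [i, j])
--                     else:
--                         a4.append([i, j])
--                 else:
--                     if i <= h:
--                         a4.append([i, j])
--                     else:
--                         a2.insert(0, [i, j])
--         if i <= h:
--             q1 += a1
--             q4 = a4 + q4
--         else:
--             q2 += a2
--             q3 = a3 + q3
--         if i < h and row[h] == "D":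
--             home.append([i, h])
--     return q1 + q2 + q3 + q4 + home
-- ===== Notes on version B (the rewrite author's own statement) =====
-- stated objective: alternative
-- what changed: B replaces A's five route-ordered region scans (four quadrant nested loops plus a home-column loop) by a single row-major pass over the board that routes each cell into one of five accumulators, building the descending-order segments by prepending, and concatenates the accumulators at the end.
-- intended difference: For n = 0, A's reversed fourth-quadrant range degenerates to the single cell (0,0) and A returns [[0,0]] when board[0][0] == '*', while B returns [] because a size-0 board has no cells; the intended route of a size-0 board is empty. — e.g. on map_route_a(0, [["*"]]): A returns [[0, 0]], B returns []
import Mathlib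
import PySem

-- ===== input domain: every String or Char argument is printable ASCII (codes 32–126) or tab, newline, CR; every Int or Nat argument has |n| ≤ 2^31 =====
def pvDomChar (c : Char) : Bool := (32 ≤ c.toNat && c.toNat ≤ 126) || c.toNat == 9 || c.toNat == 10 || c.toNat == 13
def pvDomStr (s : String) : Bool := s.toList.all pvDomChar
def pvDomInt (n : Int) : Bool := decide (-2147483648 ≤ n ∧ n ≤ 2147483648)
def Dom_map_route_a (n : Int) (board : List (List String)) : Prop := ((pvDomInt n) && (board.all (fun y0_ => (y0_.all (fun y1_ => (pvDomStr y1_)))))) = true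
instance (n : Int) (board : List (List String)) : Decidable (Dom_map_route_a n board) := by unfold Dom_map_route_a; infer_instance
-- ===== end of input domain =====

-- B replaces A's five route-ordered region scans by ONE row-major pass over the board that
-- routes each cell into five accumulators (building the descending segments by prepending);
-- objective: alternative decomposition, same asymptotic cost.

-- board[i] / board[i][j]; total via defaults — Pre_ confines the claim to in-range accesses
def pvRow (board : List (List String)) (i : Int) : List String :=
  PySem.List.pyGetD board i []
def pvCell (board : List (List String)) (i j : Int) : String :=
  PySem.List.pyGetD (pvRow board i) j ""

-- ===== PORT A =====
def map_route_a (n : Int) (board : List (List String)) : List (List Int) :=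
  let r1 := (PySem.List.pyRange 0 (PySem.Int.floordiv n 2 + 1) 1).foldl (fun acc i =>
      (PySem.List.pyRange (PySem.Int.floordiv n 2 + 1) n 1).foldl (fun acc j =>
        if pvCell board i j == "*" then acc ++ [[i, j]] else acc) acc) []
  let r2 := (PySem.List.pyRange (PySem.Int.floordiv n 2 + 1) n 1).foldl (fun acc i =>
      (PySem.List.pyRange (n - 1) (PySem.Int.floordiv n 2 - 1) (-1)).foldl (fun acc j =>
        if pvCell board i j == "*" then acc ++ [[i, j]] else acc) acc) r1
  let r3 := (PySem.List.pyRange (n - 1) (PySem.Int.floordiv n 2) (-1)).foldl (fun acc i =>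
      (PySem.List.pyRange (PySem.Int.floordiv n 2 - 1) (-1) (-1)).foldl (fun acc j =>
        if pvCell board i j == "*" then acc ++ [[i, j]] else acc) acc) r2
  let r4 := (PySem.List.pyRange (PySem.Int.floordiv n 2) (-1) (-1)).foldl (fun acc i =>
      (PySem.List.pyRange 0 (PySem.Int.floordiv n 2 + 1) 1).foldl (fun acc j =>
        if pvCell board i j == "*" then acc ++ [[i, j]] else acc) acc) r3
  let r5 := (PySem.List.pyRange 0 (PySem.Int.floordiv n 2) 1).foldl (fun acc i =>
      if pvCell board i (PySem.Int.floordiv n 2) == "D" then acc ++ [[i, PySem.Int.floordiv n 2]] else acc) r4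
  r5

-- ===== PORT B =====
-- inner loop body of B: route cell (i, j) of the current row into one of the four quadrant segments
def pvStep4 (h i : Int) (row : List String)
    (a : List (List Int) × List (List Int) × List (List Int) × List (List Int)) (j : Int) :
    List (List Int) × List (List Int) × List (List Int) × List (List Int) :=
  if PySem.List.pyGetD row j "" == "*" then
    if h < j then
      if i ≤ h then (a.1 ++ [[i, j]], a.2.1, a.2.2.1, a.2.2.2)
      else (a.1, [[i, j]] ++ a.2.1, a.2.2.1, a.2.2.2)
    else if j < h then
      if h < i then (a.1, a.2.1, [[i, j]] ++ a.2.2.1, a.2.2.2)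
      else (a.1, a.2.1, a.2.2.1, a.2.2.2 ++ [[i, j]])
    else
      if i ≤ h then (a.1, a.2.1, a.2.2.1, a.2.2.2 ++ [[i, j]])
      else (a.1, [[i, j]] ++ a.2.1, a.2.2.1, a.2.2.2)
  else a

-- outer loop body of B: merge this row's segments into the five running accumulators
def pvStep5 (n h : Int) (board : List (List String))
    (st : List (List Int) × List (List Int) × List (List Int) × List (List Int) × List (List Int))
    (i : Int) :
    List (List Int) × List (List Int) × List (List Int) × List (List Int) × List (List Int) :=
  let row := pvRow board i
  let a := (PySem.List.pyRange 0 n 1).foldl (pvStep4 h i row) ([], [], [], [])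
  let st' := if i ≤ h then (st.1 ++ a.1, st.2.1, st.2.2.1, a.2.2.2 ++ st.2.2.2.1, st.2.2.2.2)
             else (st.1, st.2.1 ++ a.2.1, a.2.2.1 ++ st.2.2.1, st.2.2.2.1, st.2.2.2.2)
  if i < h then
    if PySem.List.pyGetD row h "" == "D" then
      (st'.1, st'.2.1, st'.2.2.1, st'.2.2.2.1, st'.2.2.2.2 ++ [[i, h]])
    else st'
  else st'

def map_route_a_alt (n : Int) (board : List (List String)) : List (List Int) :=
  let h := PySem.Int.floordiv n 2
  let st := (PySem.List.pyRange 0 n 1).foldl (pvStep5 n h board) ([], [], [], [], [])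
  st.1 ++ st.2.1 ++ st.2.2.1 ++ st.2.2.2.1 ++ st.2.2.2.2

-- ===== PRECONDITION & SPEC =====
-- Pre_ excludes exactly the inputs on which the Python A raises IndexError: for n ≥ 2 A touches
-- every cell (i,j) with 0 ≤ i,j < n; for n = 1 and n = 0 it touches only cell (0,0); for n < 0 nothing.
def Pre_map_route_a (n : Int) (board : List (List String)) : Prop :=
  (n < 0) ∨
  (n = 0 ∧ 0 < board.length ∧ 0 < (board.getD 0 []).length) ∨
  (1 ≤ n ∧ n ≤ board.length ∧ ∀ row ∈ board.take n.toNat, n ≤ (row.length : Int))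
instance (n : Int) (board : List (List String)) : Decidable (Pre_map_route_a n board) := by
  unfold Pre_map_route_a; infer_instance

def pvWitness_map_route_a : Int × List (List String) := (2, [["*", "D"], ["*", "*"]])

-- For n = 0 A's reversed fourth-quadrant range degenerates to the single cell (0,0) and A returns
-- [[0,0]] when board[0][0] == "*", while B returns [] — the intended route of a size-0 board is empty.
def D_map_route_a (n : Int) (board : List (List String)) : Prop :=
  n = 0 ∧ (board.getD 0 []).getD 0 "" = "*"
instance (n : Int) (board : List (List String)) : Decidable (D_map_route_a n board) := by
  unfold D_map_route_a; infer_instance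

def Spec_map_route_a (n : Int) (board : List (List String)) (out : List (List Int)) : Prop := ¬ D_map_route_a n board → out = map_route_a_alt n board
instance (n : Int) (board : List (List String)) (out : List (List Int)) : Decidable (Spec_map_route_a n board out) := by unfold Spec_map_route_a; infer_instance

def pvDiffWitness_map_route_a : Int × List (List String) := (0, [["*"]])
def pvDiffWitnessOut_map_route_a : (List (List Int)) × (List (List Int)) := ([[0, 0]], [])

-- ===== CLAIM (what is proved, stated in full; the proofs are below) =====
def Claim_unchanged_map_route_a : Prop := ∀ (n : Int) (board : List (List String)), Dom_map_route_a n board → Pre_map_route_a n board → Spec_map_route_a n board (map_route_a n board)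
def Claim_changed_map_route_a : Prop := Dom_map_route_a (pvDiffWitness_map_route_a.1) (pvDiffWitness_map_route_a.2) ∧ Pre_map_route_a (pvDiffWitness_map_route_a.1) (pvDiffWitness_map_route_a.2) ∧ D_map_route_a (pvDiffWitness_map_route_a.1) (pvDiffWitness_map_route_a.2) ∧ map_route_a (pvDiffWitness_map_route_a.1) (pvDiffWitness_map_route_a.2) = pvDiffWitnessOut_map_route_a.1 ∧ map_route_a_alt (pvDiffWitness_map_route_a.1) (pvDiffWitness_map_route_a.2) = pvDiffWitnessOut_map_route_a.2 ∧ pvDiffWitnessOut_map_route_a.1 ≠ pvDiffWitnessOut_map_route_a.2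
def Claim_exact_map_route_a : Prop := ∀ (n : Int) (board : List (List String)), Dom_map_route_a n board → Pre_map_route_a n board → D_map_route_a n board → map_route_a n board ≠ map_route_a_alt n board

-- ===== LEMMAS AND PROOFS =====

-- filter predicates characterising the four quadrant segments of B's single pass
def pvP1 (h i : Int) (row : List String) (j : Int) : Bool :=
  (PySem.List.pyGetD row j "" == "*") && decide (h < j) && decide (i ≤ h)
def pvP2 (h i : Int) (row : List String) (j : Int) : Bool :=
  (PySem.List.pyGetD row j "" == "*") && decide (h ≤ j) && decide (h < i)
def pvP3 (h i : Int) (row : List String) (j : Int) : Bool :=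
  (PySem.List.pyGetD row j "" == "*") && decide (j < h) && decide (h < i)
def pvP4 (h i : Int) (row : List String) (j : Int) : Bool :=
  (PySem.List.pyGetD row j "" == "*") && decide (j ≤ h) && decide (i ≤ h)

def pvA1 (n h : Int) (board : List (List String)) (i : Int) : List (List Int) :=
  ((PySem.List.pyRange 0 n 1).filter (pvP1 h i (pvRow board i))).map (fun j => [i, j])
def pvA2 (n h : Int) (board : List (List String)) (i : Int) : List (List Int) :=
  (((PySem.List.pyRange 0 n 1).filter (pvP2 h i (pvRow board i))).map (fun j => [i, j])).reverse
def pvA3 (n h : Int) (board : List (List String)) (i : Int) : List (List Int) :=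
  (((PySem.List.pyRange 0 n 1).filter (pvP3 h i (pvRow board i))).map (fun j => [i, j])).reverse
def pvA4 (n h : Int) (board : List (List String)) (i : Int) : List (List Int) :=
  ((PySem.List.pyRange 0 n 1).filter (pvP4 h i (pvRow board i))).map (fun j => [i, j])
def pvPH (h : Int) (board : List (List String)) (i : Int) : Bool :=
  decide (i < h) && (pvCell board i h == "D")

theorem pvInner_char (h i : Int) (row : List String) (lj : List Int)
    (a : List (List Int) × List (List Int) × List (List Int) × List (List Int)) :
    lj.foldl (pvStep4 h i row) a =
      (a.1 ++ (lj.filter (pvP1 h i row)).map (fun j => [i, j]),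
       ((lj.filter (pvP2 h i row)).map (fun j => [i, j])).reverse ++ a.2.1,
       ((lj.filter (pvP3 h i row)).map (fun j => [i, j])).reverse ++ a.2.2.1,
       a.2.2.2 ++ (lj.filter (pvP4 h i row)).map (fun j => [i, j])) := by
  induction lj generalizing a with
  | nil => simp
  | cons j lj ih =>
    obtain ⟨a1, a2, a3, a4⟩ := a
    by_cases hstar : (PySem.List.pyGetD row j "" == "*") = true
    · by_cases h1 : h < j
      · by_cases h3 : i ≤ h
        · simp [pvStep4, pvP1, pvP2, pvP3, pvP4, hstar, h1, h3, ih,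
            show ¬ j < h by omega, show h ≤ j by omega, show ¬ h < i by omega]
        · simp [pvStep4, pvP1, pvP2, pvP3, pvP4, hstar, h1, h3, ih,
            show ¬ j < h by omega, show h ≤ j by omega, show h < i by omega]
      · by_cases h2 : j < h
        · by_cases h3 : h < i
          · simp [pvStep4, pvP1, pvP2, pvP3, pvP4, hstar, h1, h2, h3, ih,
              show ¬ h ≤ j by omega, show j ≤ h by omega, show ¬ i ≤ h by omega]
          · simp [pvStep4, pvP1, pvP2, pvP3, pvP4, hstar, h1, h2, h3, ih,
              show ¬ h ≤ j by omega, show j ≤ h by omega, show i ≤ h by omega]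
        · by_cases h3 : i ≤ h
          · simp [pvStep4, pvP1, pvP2, pvP3, pvP4, hstar, h1, h2, h3, ih,
              show h ≤ j by omega, show j ≤ h by omega, show ¬ h < i by omega]
          · simp [pvStep4, pvP1, pvP2, pvP3, pvP4, hstar, h1, h2, h3, ih,
              show h ≤ j by omega, show j ≤ h by omega, show h < i by omega]
    · simp [pvStep4, pvP1, pvP2, pvP3, pvP4, hstar, ih]

theorem pvStep5_eq (n h : Int) (board : List (List String))
    (st : List (List Int) × List (List Int) × List (List Int) × List (List Int) × List (List Int))
    (i : Int) :
    pvStep5 n h board st i =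
      (st.1 ++ pvA1 n h board i,
       st.2.1 ++ pvA2 n h board i,
       pvA3 n h board i ++ st.2.2.1,
       pvA4 n h board i ++ st.2.2.2.1,
       st.2.2.2.2 ++ if pvPH h board i then [[i, h]] else []) := by
  obtain ⟨q1, q2, q3, q4, q5⟩ := st
  unfold pvStep5
  simp only [pvInner_char]
  by_cases hi : i ≤ h
  · have e2 : pvA2 n h board i = [] := by
      simp only [pvA2, List.reverse_eq_nil_iff, List.map_eq_nil_iff, List.filter_eq_nil_iff,
        pvP2]
      intro j _
      simp; omega
    have e3 : pvA3 n h board i = [] := by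
      simp only [pvA3, List.reverse_eq_nil_iff, List.map_eq_nil_iff, List.filter_eq_nil_iff,
        pvP3]
      intro j _
      simp; omega
    by_cases hih : i < h
    · by_cases hD : (PySem.List.pyGetD (pvRow board i) h "" == "D") = true
      · simp [hi, hih, hD, e2, e3, pvA1, pvA4, pvPH, pvCell]
      · simp [hi, hih, hD, e2, e3, pvA1, pvA4, pvPH, pvCell]
    · simp [hi, hih, e2, e3, pvA1, pvA4, pvPH, pvCell]
  · have e1 : pvA1 n h board i = [] := by
      simp only [pvA1, List.map_eq_nil_iff, List.filter_eq_nil_iff, pvP1]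
      intro j _
      simp; omega
    have e4 : pvA4 n h board i = [] := by
      simp only [pvA4, List.map_eq_nil_iff, List.filter_eq_nil_iff, pvP4]
      intro j _
      simp; omega
    have hih : ¬ i < h := by omega
    simp [hi, hih, e1, e4, pvA2, pvA3, pvPH, pvCell]

theorem pvOuter_char (n h : Int) (board : List (List String)) (li : List Int)
    (st : List (List Int) × List (List Int) × List (List Int) × List (List Int) × List (List Int)) :
    li.foldl (pvStep5 n h board) st =
      (st.1 ++ li.flatMap (pvA1 n h board),
       st.2.1 ++ li.flatMap (pvA2 n h board),
       li.reverse.flatMap (pvA3 n h board) ++ st.2.2.1,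
       li.reverse.flatMap (pvA4 n h board) ++ st.2.2.2.1,
       st.2.2.2.2 ++ (li.filter (pvPH h board)).map (fun i => [i, h])) := by
  induction li generalizing st with
  | nil => simp
  | cons i li ih =>
    rw [List.foldl_cons, ih, pvStep5_eq]
    by_cases hp : pvPH h board i = true
    · simp [hp, List.append_assoc]
    · simp [hp, List.append_assoc]

-- A's five regions in route order
def pvR1 (n h : Int) (board : List (List String)) : List (List Int) :=
  (PySem.List.pyRange 0 (h+1) 1).flatMap (fun i =>
    ((PySem.List.pyRange (h+1) n 1).filter (fun j => pvCell board i j == "*")).map (fun j => [i, j]))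
def pvR2 (n h : Int) (board : List (List String)) : List (List Int) :=
  (PySem.List.pyRange (h+1) n 1).flatMap (fun i =>
    ((PySem.List.pyRange (n-1) (h-1) (-1)).filter (fun j => pvCell board i j == "*")).map (fun j => [i, j]))
def pvR3 (n h : Int) (board : List (List String)) : List (List Int) :=
  (PySem.List.pyRange (n-1) h (-1)).flatMap (fun i =>
    ((PySem.List.pyRange (h-1) (-1) (-1)).filter (fun j => pvCell board i j == "*")).map (fun j => [i, j]))
def pvR4 (n h : Int) (board : List (List String)) : List (List Int) :=
  (PySem.List.pyRange h (-1) (-1)).flatMap (fun i =>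
    ((PySem.List.pyRange 0 (h+1) 1).filter (fun j => pvCell board i j == "*")).map (fun j => [i, j]))
def pvR5 (h : Int) (board : List (List String)) : List (List Int) :=
  ((PySem.List.pyRange 0 h 1).filter (fun i => pvCell board i h == "D")).map (fun i => [i, h])

theorem pvA_eq_regions (n : Int) (board : List (List String)) :
    map_route_a n board =
      pvR1 n (PySem.Int.floordiv n 2) board ++ pvR2 n (PySem.Int.floordiv n 2) board ++
      pvR3 n (PySem.Int.floordiv n 2) board ++ pvR4 n (PySem.Int.floordiv n 2) board ++
      pvR5 (PySem.Int.floordiv n 2) board := by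
  unfold map_route_a pvR1 pvR2 pvR3 pvR4 pvR5
  simp only [PySem.List.foldl_append_if, PySem.List.foldl_append_eq_flatMap,
    List.nil_append, List.append_assoc]

theorem pvAlt_eq (n : Int) (board : List (List String)) :
    map_route_a_alt n board =
      (PySem.List.pyRange 0 n 1).flatMap (pvA1 n (PySem.Int.floordiv n 2) board) ++
      (PySem.List.pyRange 0 n 1).flatMap (pvA2 n (PySem.Int.floordiv n 2) board) ++
      (PySem.List.pyRange 0 n 1).reverse.flatMap (pvA3 n (PySem.Int.floordiv n 2) board) ++
      (PySem.List.pyRange 0 n 1).reverse.flatMap (pvA4 n (PySem.Int.floordiv n 2) board) ++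
      ((PySem.List.pyRange 0 n 1).filter (pvPH (PySem.Int.floordiv n 2) board)).map
        (fun i => [i, PySem.Int.floordiv n 2]) := by
  unfold map_route_a_alt
  simp only [pvOuter_char]
  simp [List.append_assoc]

theorem pvComp1 (n h : Int) (board : List (List String)) (h0 : 0 ≤ h) (h1 : h < n) :
    (PySem.List.pyRange 0 n 1).flatMap (pvA1 n h board) = pvR1 n h board := by
  rw [PySem.List.pyRange_one_append 0 (h+1) n (by omega) (by omega), List.flatMap_append]
  have t2 : (PySem.List.pyRange (h+1) n 1).flatMap (pvA1 n h board) = [] := by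
    apply List.flatMap_eq_nil_iff.mpr
    intro i hi
    have hmem := (PySem.List.mem_pyRange_one.mp hi).1
    simp only [pvA1, List.map_eq_nil_iff, List.filter_eq_nil_iff, pvP1]
    intro j _; simp; omega
  rw [t2, List.append_nil]
  unfold pvR1
  apply List.flatMap_congr
  intro i hi
  have hmem := PySem.List.mem_pyRange_one.mp hi
  unfold pvA1
  rw [PySem.List.pyRange_one_append 0 (h+1) n (by omega) (by omega), List.filter_append]
  have f1 : (PySem.List.pyRange 0 (h+1) 1).filter (pvP1 h i (pvRow board i)) = [] := by
    apply List.filter_eq_nil_iff.mpr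
    intro j hj
    have := PySem.List.mem_pyRange_one.mp hj
    simp [pvP1]; omega
  rw [f1, List.nil_append]
  congr 1
  apply List.filter_congr
  intro j hj
  have := PySem.List.mem_pyRange_one.mp hj
  simp [pvP1, pvCell, show h < j by omega, show i ≤ h by omega]

theorem pvComp2 (n h : Int) (board : List (List String)) (h0 : 0 ≤ h) (h1 : h < n) :
    (PySem.List.pyRange 0 n 1).flatMap (pvA2 n h board) = pvR2 n h board := by
  rw [PySem.List.pyRange_one_append 0 (h+1) n (by omega) (by omega), List.flatMap_append]
  have t1 : (PySem.List.pyRange 0 (h+1) 1).flatMap (pvA2 n h board) = [] := by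
    apply List.flatMap_eq_nil_iff.mpr
    intro i hi
    have hmem := (PySem.List.mem_pyRange_one.mp hi).2
    simp only [pvA2, List.reverse_eq_nil_iff, List.map_eq_nil_iff, List.filter_eq_nil_iff, pvP2]
    intro j _; simp; omega
  rw [t1, List.nil_append]
  unfold pvR2
  apply List.flatMap_congr
  intro i hi
  have hmem := PySem.List.mem_pyRange_one.mp hi
  have hrange : PySem.List.pyRange (n-1) (h-1) (-1) = (PySem.List.pyRange h n 1).reverse := by
    rw [PySem.List.pyRange_neg_one_eq_reverse]
    congr 1 <;> ring
  rw [hrange, List.filter_reverse, List.map_reverse]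
  unfold pvA2
  congr 2
  rw [PySem.List.pyRange_one_append 0 h n (by omega) (by omega), List.filter_append]
  have f1 : (PySem.List.pyRange 0 h 1).filter (pvP2 h i (pvRow board i)) = [] := by
    apply List.filter_eq_nil_iff.mpr
    intro j hj
    have := PySem.List.mem_pyRange_one.mp hj
    simp [pvP2]; omega
  rw [f1, List.nil_append]
  apply List.filter_congr
  intro j hj
  have := PySem.List.mem_pyRange_one.mp hj
  simp [pvP2, pvCell, show h ≤ j by omega, show h < i by omega]

theorem pvComp3 (n h : Int) (board : List (List String)) (h0 : 0 ≤ h) (h1 : h < n) :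
    (PySem.List.pyRange 0 n 1).reverse.flatMap (pvA3 n h board) = pvR3 n h board := by
  rw [PySem.List.pyRange_one_append 0 (h+1) n (by omega) (by omega), List.reverse_append,
    List.flatMap_append]
  have t1 : (PySem.List.pyRange 0 (h+1) 1).reverse.flatMap (pvA3 n h board) = [] := by
    apply List.flatMap_eq_nil_iff.mpr
    intro i hi
    have hmem := (PySem.List.mem_pyRange_one.mp (List.mem_reverse.mp hi)).2
    simp only [pvA3, List.reverse_eq_nil_iff, List.map_eq_nil_iff, List.filter_eq_nil_iff, pvP3]
    intro j _; simp; omega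
  rw [t1, List.append_nil]
  unfold pvR3
  have hrange : PySem.List.pyRange (n-1) h (-1) = (PySem.List.pyRange (h+1) n 1).reverse := by
    rw [PySem.List.pyRange_neg_one_eq_reverse]
    congr 1 <;> ring
  rw [hrange]
  apply List.flatMap_congr
  intro i hi
  have hmem := PySem.List.mem_pyRange_one.mp (List.mem_reverse.mp hi)
  have hrange2 : PySem.List.pyRange (h-1) (-1) (-1) = (PySem.List.pyRange 0 h 1).reverse := by
    rw [PySem.List.pyRange_neg_one_eq_reverse]
    congr 1 <;> ring
  rw [hrange2, List.filter_reverse, List.map_reverse]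
  unfold pvA3
  congr 2
  rw [PySem.List.pyRange_one_append 0 h n (by omega) (by omega), List.filter_append]
  have f2 : (PySem.List.pyRange h n 1).filter (pvP3 h i (pvRow board i)) = [] := by
    apply List.filter_eq_nil_iff.mpr
    intro j hj
    have := PySem.List.mem_pyRange_one.mp hj
    simp [pvP3]; omega
  rw [f2, List.append_nil]
  apply List.filter_congr
  intro j hj
  have := PySem.List.mem_pyRange_one.mp hj
  simp [pvP3, pvCell, show j < h by omega, show h < i by omega]

theorem pvComp4 (n h : Int) (board : List (List String)) (h0 : 0 ≤ h) (h1 : h < n) :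
    (PySem.List.pyRange 0 n 1).reverse.flatMap (pvA4 n h board) = pvR4 n h board := by
  rw [PySem.List.pyRange_one_append 0 (h+1) n (by omega) (by omega), List.reverse_append,
    List.flatMap_append]
  have t2 : (PySem.List.pyRange (h+1) n 1).reverse.flatMap (pvA4 n h board) = [] := by
    apply List.flatMap_eq_nil_iff.mpr
    intro i hi
    have hmem := (PySem.List.mem_pyRange_one.mp (List.mem_reverse.mp hi)).1
    simp only [pvA4, List.map_eq_nil_iff, List.filter_eq_nil_iff, pvP4]
    intro j _; simp; omega
  rw [t2, List.nil_append]
  unfold pvR4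
  have hrange : PySem.List.pyRange h (-1) (-1) = (PySem.List.pyRange 0 (h+1) 1).reverse := by
    rw [PySem.List.pyRange_neg_one_eq_reverse]
    congr 1 <;> ring
  rw [hrange]
  apply List.flatMap_congr
  intro i hi
  have hmem := PySem.List.mem_pyRange_one.mp (List.mem_reverse.mp hi)
  unfold pvA4
  rw [PySem.List.pyRange_one_append 0 (h+1) n (by omega) (by omega), List.filter_append]
  have f2 : (PySem.List.pyRange (h+1) n 1).filter (pvP4 h i (pvRow board i)) = [] := by
    apply List.filter_eq_nil_iff.mpr
    intro j hj
    have := PySem.List.mem_pyRange_one.mp hj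
    simp [pvP4]; omega
  rw [f2, List.append_nil]
  congr 1
  apply List.filter_congr
  intro j hj
  have := PySem.List.mem_pyRange_one.mp hj
  simp [pvP4, pvCell, show j ≤ h by omega, show i ≤ h by omega]

theorem pvComp5 (n h : Int) (board : List (List String)) (h0 : 0 ≤ h) (h1 : h < n) :
    ((PySem.List.pyRange 0 n 1).filter (pvPH h board)).map (fun i => ([i, h] : List Int)) =
      pvR5 h board := by
  rw [PySem.List.pyRange_one_append 0 h n (by omega) (by omega), List.filter_append]
  have f2 : (PySem.List.pyRange h n 1).filter (pvPH h board) = [] := by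
    apply List.filter_eq_nil_iff.mpr
    intro i hi
    have := PySem.List.mem_pyRange_one.mp hi
    simp [pvPH]; omega
  rw [f2, List.append_nil]
  unfold pvR5
  congr 1
  apply List.filter_congr
  intro i hi
  have := PySem.List.mem_pyRange_one.mp hi
  simp [pvPH, show i < h by omega]

theorem pvAB_pos (n : Int) (board : List (List String)) (hn : 1 ≤ n) :
    map_route_a n board = map_route_a_alt n board := by
  have hfd : PySem.Int.floordiv n 2 = n / 2 := PySem.Int.floordiv_eq_ediv_of_pos (by omega)
  have h0 : 0 ≤ PySem.Int.floordiv n 2 := by rw [hfd]; omega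
  have h1 : PySem.Int.floordiv n 2 < n := by rw [hfd]; omega
  rw [pvA_eq_regions, pvAlt_eq, pvComp1 n _ board h0 h1, pvComp2 n _ board h0 h1,
    pvComp3 n _ board h0 h1, pvComp4 n _ board h0 h1, pvComp5 n _ board h0 h1]

theorem pvA_neg (n : Int) (board : List (List String)) (hn : n < 0) :
    map_route_a n board = [] := by
  have hfd : PySem.Int.floordiv n 2 = n / 2 := PySem.Int.floordiv_eq_ediv_of_pos (by omega)
  unfold map_route_a
  rw [hfd,
    PySem.List.pyRange_one_eq_nil (by omega : (n / 2 + 1 : Int) ≤ 0),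
    PySem.List.pyRange_one_eq_nil (by omega : n ≤ n / 2 + 1),
    PySem.List.pyRange_neg_one_eq_nil (by omega : (n - 1 : Int) ≤ n / 2),
    PySem.List.pyRange_neg_one_eq_nil (by omega : (n / 2 : Int) ≤ -1),
    PySem.List.pyRange_one_eq_nil (by omega : (n / 2 : Int) ≤ 0)]
  simp

theorem pvAlt_nonpos (n : Int) (board : List (List String)) (hn : n ≤ 0) :
    map_route_a_alt n board = [] := by
  unfold map_route_a_alt
  rw [PySem.List.pyRange_one_eq_nil (by omega : n ≤ 0)]
  simp

theorem pvA_zero (n : Int) (board : List (List String)) (hn : n = 0) :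
    map_route_a n board = if pvCell board 0 0 == "*" then [[0, 0]] else [] := by
  subst hn
  have e0 : PySem.Int.floordiv 0 2 = 0 := by decide
  have r1 : PySem.List.pyRange 0 1 1 = [0] := by decide
  have r2 : PySem.List.pyRange 1 0 1 = [] := by decide
  have r3 : PySem.List.pyRange (0-1) (0-1) (-1) = [] := by decide
  have r4 : PySem.List.pyRange (0-1) 0 (-1) = [] := by decide
  have r5 : PySem.List.pyRange 0 (-1) (-1) = [0] := by decide
  have r6 : PySem.List.pyRange 0 0 1 = [] := by decide
  unfold map_route_a
  rw [e0]
  norm_num [r1, r2, r3, r4, r5, r6]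

-- ===== VERDICT\n\n-- ===== VERDICT (by name: the statement is the Claim_ definition above) =====
theorem map_route_a_spec : Claim_unchanged_map_route_a := by
  intro n board _ _ hD
  rcases lt_trichotomy n 0 with hn | hn | hn
  · rw [pvA_neg n board hn, pvAlt_nonpos n board (by omega)]
  · have hne : ¬ ((board.getD 0 []).getD 0 "" = "*") := fun hc => hD ⟨hn, hc⟩
    rw [pvA_zero n board hn, pvAlt_nonpos n board (by omega)]
    simp only [List.getD_eq_getElem?_getD] at hne
    simp [pvCell, pvRow, PySem.List.pyGetD_zero, hne]
  · exact pvAB_pos n board (by omega)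

theorem map_route_a_changed : Claim_changed_map_route_a := by
  unfold Claim_changed_map_route_a; decide

theorem map_route_a_tight : Claim_exact_map_route_a := by
  intro n board _ _ hD
  obtain ⟨hn0, hstar⟩ := hD
  rw [pvA_zero n board hn0, pvAlt_nonpos n board (by omega)]
  simp only [List.getD_eq_getElem?_getD] at hstar
  simp [pvCell, pvRow, PySem.List.pyGetD_zero, hstar]
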